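-- pv_equiv track=rewrite | github.com/Khoshkhah/NRTCalib | calib.py | sensorTimeCalc
-- ===== SOURCE A (Python) =====
-- def sensorTimeCalc(edges, measurment_edge2id, edge2time):
--     edges = edges.split(" ")
--     _time = 0
--     time_list = list()
--     for edge in edges:
--         _time += edge2time[edge]
--         if edge in measurment_edge2id.keys():
--             time_list.append(str(_time))
--     if(len(time_list)==0):
--         return None
--     else:
--         return " ".join(time_list)
-- ===== SOURCE B (Python) =====
-- def sensorTimeCalc(edges, measurment_edge2id, edge2time):
--     toks = edges.split(" ")
--     # pass 1: look every edge up once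
--     vals = [edge2time[e] for e in toks]
--     # pass 2: split the value stream into segments, each ending at a measurement edge
--     # (values after the last measurement edge belong to no segment)
--     segs = []
--     cur = []
--     for e, v in zip(toks, vals):
--         cur.append(v)
--         if e in measurment_edge2id:
--             segs.append(cur)
--             cur = []
--     if not segs:
--         return None
--     # pass 3: one cumulative segment sum per measurement edge
--     out = []
--     t = 0
--     for seg in segs:
--         t += sum(seg)
--         out.append(str(t))
--     return " ".join(out)
-- ===== Notes on version B (the rewrite author's own statement) =====
-- stated objective: alternative
-- what changed: Instead of A's single interleaved accumulate-and-emit loop, B makes three passes: look every edge time up once, split the value stream into segments each ending at a measurement edge, then emit one cumulative segment sum per segment.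
import Mathlib
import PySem

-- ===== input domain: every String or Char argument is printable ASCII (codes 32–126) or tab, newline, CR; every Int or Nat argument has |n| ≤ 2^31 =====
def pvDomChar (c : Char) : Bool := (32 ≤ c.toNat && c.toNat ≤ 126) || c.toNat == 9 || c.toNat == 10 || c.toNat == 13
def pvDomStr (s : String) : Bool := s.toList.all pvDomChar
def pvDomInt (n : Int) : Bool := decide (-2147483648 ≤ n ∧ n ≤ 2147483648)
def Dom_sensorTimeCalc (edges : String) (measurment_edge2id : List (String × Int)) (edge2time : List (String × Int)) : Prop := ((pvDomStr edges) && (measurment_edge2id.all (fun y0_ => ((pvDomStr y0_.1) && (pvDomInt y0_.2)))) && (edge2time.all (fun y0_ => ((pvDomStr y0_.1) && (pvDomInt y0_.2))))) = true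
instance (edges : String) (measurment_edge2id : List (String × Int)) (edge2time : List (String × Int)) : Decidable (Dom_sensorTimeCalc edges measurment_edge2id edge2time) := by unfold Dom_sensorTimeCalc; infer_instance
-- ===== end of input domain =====

-- B re-implements A's single accumulate-and-emit loop as two passes: split the tokens into
-- segments ending at measurement edges, then emit one cumulative segment sum per segment
-- (alternative decomposition, same O(n) cost); equivalence is proved on inputs where the
-- Python raises no KeyError (Pre_).

-- ===== PORT A =====
-- the for-loop of A: state (_time, time_list); KeyError on a missing edge → none
def pvALoop (md e2t : PySem.Dict String Int) : List String → Int → List String → Option (List String)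
  | [], _, acc => some acc
  | tok :: rest, t, acc =>
    match e2t.get? tok with
    | none => none
    | some v =>
      pvALoop md e2t rest (t + v)
        (if md.contains tok then acc ++ [PySem.Int.toStr (t + v)] else acc)

def sensorTimeCalc (edges : String) (measurment_edge2id : List (String × Int)) (edge2time : List (String × Int)) : Option String :=
  let toks := (PySem.Str.split? edges " ").getD []
  match pvALoop (PySem.Dict.ofList measurment_edge2id) (PySem.Dict.ofList edge2time) toks 0 [] with
  | none => none
  | some tl => if tl.length = 0 then none else some (PySem.Str.join " " tl)

-- ===== PORT B =====
-- pass 1 of Source B: [edge2time[e] for e in toks]; KeyError on a missing edge → none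
def pvBVals (e2t : PySem.Dict String Int) : List String → Option (List Int)
  | [] => some []
  | e :: rest =>
    match e2t.get? e with
    | none => none
    | some v => (pvBVals e2t rest).map (v :: ·)

-- pass 2 of Source B: cut the zipped (edge, value) stream into segments, each ending at a measurement edge
def pvBGroup (md : PySem.Dict String Int) : List (String × Int) → List Int → List (List Int)
  | [], _cur => []
  | p :: rest, cur =>
    let cur' := cur ++ [p.2]
    if md.contains p.1 then cur' :: pvBGroup md rest [] else pvBGroup md rest cur'

-- pass 3 of Source B: cumulative segment sums
def pvBOut : List (List Int) → Int → List String
  | [], _ => []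
  | seg :: rest, t => PySem.Int.toStr (t + seg.sum) :: pvBOut rest (t + seg.sum)

def sensorTimeCalc_alt (edges : String) (measurment_edge2id : List (String × Int)) (edge2time : List (String × Int)) : Option String :=
  let toks := (PySem.Str.split? edges " ").getD []
  match pvBVals (PySem.Dict.ofList edge2time) toks with
  | none => none
  | some vals =>
    let segs := pvBGroup (PySem.Dict.ofList measurment_edge2id) (toks.zip vals) []
    if segs.isEmpty then none else some (PySem.Str.join " " (pvBOut segs 0))

-- ===== PRECONDITION & SPEC =====
-- Pre_ excludes exactly the inputs on which A raises KeyError: some token of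
-- edges.split(" ") is not a key of edge2time.
def Pre_sensorTimeCalc (edges : String) (measurment_edge2id : List (String × Int)) (edge2time : List (String × Int)) : Prop :=
  ∀ tok ∈ (PySem.Str.split? edges " ").getD [], (PySem.Dict.ofList edge2time).contains tok = true
instance (edges : String) (measurment_edge2id : List (String × Int)) (edge2time : List (String × Int)) : Decidable (Pre_sensorTimeCalc edges measurment_edge2id edge2time) := by unfold Pre_sensorTimeCalc; infer_instance

def pvWitness_sensorTimeCalc : String × (List (String × Int)) × (List (String × Int)) :=
  ("a b a", [("b", 1)], [("a", 2), ("b", 3)])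

def Spec_sensorTimeCalc (edges : String) (measurment_edge2id : List (String × Int)) (edge2time : List (String × Int)) (out : Option String) : Prop := out = sensorTimeCalc_alt edges measurment_edge2id edge2time
instance (edges : String) (measurment_edge2id : List (String × Int)) (edge2time : List (String × Int)) (out : Option String) : Decidable (Spec_sensorTimeCalc edges measurment_edge2id edge2time out) := by unfold Spec_sensorTimeCalc; infer_instance

-- ===== CLAIM (what is proved, stated in full; the proofs are below) =====
def Claim_equal_sensorTimeCalc : Prop := ∀ (edges : String) (measurment_edge2id : List (String × Int)) (edge2time : List (String × Int)), Dom_sensorTimeCalc edges measurment_edge2id edge2time → Pre_sensorTimeCalc edges measurment_edge2id edge2time → Spec_sensorTimeCalc edges measurment_edge2id edge2time (sensorTimeCalc edges measurment_edge2id edge2time)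

-- ===== LEMMAS AND PROOFS =====

-- the common interleaved value both programs compute (proof-only)
def pvEmit (md e2t : PySem.Dict String Int) : List String → Int → List String
  | [], _ => []
  | tok :: rest, t =>
    (if md.contains tok then [PySem.Int.toStr (t + e2t.getD tok 0)] else [])
      ++ pvEmit md e2t rest (t + e2t.getD tok 0)

theorem pvGet?_of_contains (e2t : PySem.Dict String Int) (tok : String)
    (hc : e2t.contains tok = true) : e2t.get? tok = some (e2t.getD tok 0) := by
  rw [PySem.Dict.contains_eq_isSome_get?] at hc
  cases hv : e2t.get? tok with
  | none => simp [hv] at hc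
  | some v => simp [PySem.Dict.getD_eq_get?_getD, hv]

theorem pvALoop_eq (md e2t : PySem.Dict String Int) (toks : List String)
    (h : ∀ tok ∈ toks, e2t.contains tok = true) (t : Int) (acc : List String) :
    pvALoop md e2t toks t acc = some (acc ++ pvEmit md e2t toks t) := by
  induction toks generalizing t acc with
  | nil => simp [pvALoop, pvEmit]
  | cons tok rest ih =>
    rw [pvALoop, pvGet?_of_contains e2t tok (h tok (by simp))]
    dsimp only
    rw [ih (fun x hx => h x (by simp [hx]))]
    simp [pvEmit]
    split <;> simp

theorem pvBVals_eq (e2t : PySem.Dict String Int) (toks : List String)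
    (h : ∀ tok ∈ toks, e2t.contains tok = true) :
    pvBVals e2t toks = some (toks.map (fun e => e2t.getD e 0)) := by
  induction toks with
  | nil => simp [pvBVals]
  | cons e rest ih =>
    rw [pvBVals, pvGet?_of_contains e2t e (h e (by simp))]
    dsimp only
    rw [ih (fun x hx => h x (by simp [hx]))]
    simp

theorem pvBOut_group_eq (md e2t : PySem.Dict String Int) (toks : List String)
    (cur : List Int) (t : Int) :
    pvBOut (pvBGroup md (toks.zip (toks.map (fun e => e2t.getD e 0))) cur) t
      = pvEmit md e2t toks (t + cur.sum) := by
  induction toks generalizing cur t with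
  | nil => simp [pvBGroup, pvBOut, pvEmit]
  | cons e rest ih =>
    simp only [List.map_cons, List.zip_cons_cons]
    rw [pvBGroup]
    by_cases hc : md.contains e = true
    · simp only [hc, if_pos]
      rw [pvBOut, ih [] (t + (cur ++ [e2t.getD e 0]).sum)]
      simp [pvEmit, hc]
      constructor <;> ring_nf
    · have hc' : md.contains e = false := by simpa using hc
      rw [if_neg (by simp [hc'])]
      rw [ih (cur ++ [e2t.getD e 0]) t]
      simp [pvEmit, hc']
      ring_nf

theorem pvBGroup_nil_iff (md : PySem.Dict String Int) (toks : List (String × Int))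
    (cur : List Int) :
    pvBGroup md toks cur = [] ↔ ∀ p ∈ toks, md.contains p.1 = false := by
  induction toks generalizing cur with
  | nil => simp [pvBGroup]
  | cons p rest ih =>
    rw [pvBGroup]
    by_cases hc : md.contains p.1 = true
    · simp [hc]
    · have hc' : md.contains p.1 = false := by simpa using hc
      simp [hc', ih]

theorem pvMem_zip_map_self {α β : Type} (f : α → β) (e : α) (toks : List α)
    (he : e ∈ toks) : (e, f e) ∈ toks.zip (toks.map f) := by
  induction toks with
  | nil => simp at he
  | cons x rest ih =>
    rcases List.mem_cons.mp he with h | h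
    · subst h; simp
    · simp [ih h]

theorem pvEmit_nil_iff (md e2t : PySem.Dict String Int) (toks : List String) (t : Int) :
    pvEmit md e2t toks t = [] ↔ ∀ e ∈ toks, md.contains e = false := by
  induction toks generalizing t with
  | nil => simp [pvEmit]
  | cons e rest ih =>
    rw [pvEmit]
    by_cases hc : md.contains e = true <;> simp [hc, ih]

-- ===== VERDICT (by name: the statement is the Claim_ definition above) =====
theorem sensorTimeCalc_spec : Claim_equal_sensorTimeCalc := by
  intro edges m e2 _hdom hpre
  unfold Spec_sensorTimeCalc sensorTimeCalc sensorTimeCalc_alt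
  set md := PySem.Dict.ofList m
  set e2t := PySem.Dict.ofList e2
  set toks := (PySem.Str.split? edges " ").getD [] with htoks
  have hall : ∀ tok ∈ toks, e2t.contains tok = true := hpre
  dsimp only
  rw [pvALoop_eq md e2t toks hall 0 [], pvBVals_eq e2t toks hall]
  dsimp only
  rw [show ([] : List String) ++ pvEmit md e2t toks 0 = pvEmit md e2t toks 0 from by simp]
  by_cases hseg : pvBGroup md (toks.zip (toks.map (fun e => e2t.getD e 0))) [] = []
  · have hemit : pvEmit md e2t toks 0 = [] := by
      rw [pvEmit_nil_iff]
      intro e he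
      exact (pvBGroup_nil_iff md _ []).mp hseg (e, e2t.getD e 0)
        (pvMem_zip_map_self (fun e => e2t.getD e 0) e toks he)
    simp [hseg, hemit]
  · have hemit : ¬ pvEmit md e2t toks 0 = [] := by
      intro h
      apply hseg
      rw [pvBGroup_nil_iff]
      intro p hp
      have := (pvEmit_nil_iff md e2t toks 0).mp h p.1 (List.of_mem_zip hp).1
      exact this
    simp only [List.isEmpty_iff, hseg]
    simp
    rw [pvBOut_group_eq md e2t toks [] 0]
    simp [hemit]
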